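-- pv_equiv track=rewrite | github.com/h58fmb0344g9h3/nnnnaoakjnnnn | update_proxy_status.py | clean_isp
-- ===== SOURCE A (Python) =====
-- def clean_isp(isp):
--     """
--     Membersihkan nama ISP dengan menghapus tanda baca dan karakter khusus.
--     Contoh:
--       "PT. Telkom, Indonesia" -> "PT Telkom Indonesia"
--       "Google, LLC." -> "Google LLC"
--     """
--     if not isp:
--         return "UNKNOWN"
--
--     # Daftar karakter yang akan dihapus
--     chars_to_remove = [',', '.', ';', ':', '!', '?', '@', '#', '$', '%', '&', '*', '(', ')']
--
--     # Hapus karakter khusus dan multiple spaces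
--     cleaned = isp
--     for char in chars_to_remove:
--         cleaned = cleaned.replace(char, ' ')
--
--     # Hapus spasi berlebih dan strip whitespace
--     cleaned = ' '.join(cleaned.split()).strip()
--
--     return cleaned
-- ===== SOURCE B (Python) =====
-- def clean_isp(isp):
--     if not isp:
--         return "UNKNOWN"
--     punct = {',', '.', ';', ':', '!', '?', '@', '#', '$', '%', '&', '*', '(', ')'}
--     cleaned = ''.join(' ' if c in punct else c for c in isp)
--     return ' '.join(cleaned.split())
-- ===== Notes on version B (the rewrite author's own statement) =====
-- stated objective: simpler
-- what changed: One character-by-character pass replacing punctuation via a membership set, instead of 14 full-string replace passes; the redundant final .strip() is dropped (proved a no-op).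
import Mathlib
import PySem

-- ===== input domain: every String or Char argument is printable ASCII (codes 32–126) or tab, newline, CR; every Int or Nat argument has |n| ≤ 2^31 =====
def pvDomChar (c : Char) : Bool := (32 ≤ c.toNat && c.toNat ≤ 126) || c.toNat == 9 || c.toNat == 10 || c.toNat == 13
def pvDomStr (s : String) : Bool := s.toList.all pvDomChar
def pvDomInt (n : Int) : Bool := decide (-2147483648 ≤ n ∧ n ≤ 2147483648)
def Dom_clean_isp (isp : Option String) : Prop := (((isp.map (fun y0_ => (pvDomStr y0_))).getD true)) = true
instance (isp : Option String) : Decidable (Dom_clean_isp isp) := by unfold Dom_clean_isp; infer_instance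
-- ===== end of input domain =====

-- B cleans the ISP name in one character pass over the input (membership in a punctuation
-- list) instead of A's 14 full-string replace passes, and drops A's redundant final strip.


-- ===== PORT A =====
def clean_isp (isp : Option String) : String :=
  match isp with
  | none => "UNKNOWN"
  | some s =>
    if s = "" then "UNKNOWN"
    else
      let chars_to_remove : List String :=
        [",", ".", ";", ":", "!", "?", "@", "#", "$", "%", "&", "*", "(", ")"]
      let cleaned := chars_to_remove.foldl (fun acc ch => PySem.Str.replace acc ch " ") s
      PySem.Str.strip (PySem.Str.join " " (PySem.Str.split₀ cleaned))

-- ===== PORT B =====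
def pvPunct : List Char := [',', '.', ';', ':', '!', '?', '@', '#', '$', '%', '&', '*', '(', ')']

def clean_isp_alt (isp : Option String) : String :=
  match isp with
  | none => "UNKNOWN"
  | some s =>
    if s = "" then "UNKNOWN"
    else
      let cleaned := String.ofList (s.toList.map (fun c => if c ∈ pvPunct then ' ' else c))
      PySem.Str.join " " (PySem.Str.split₀ cleaned)

-- ===== PRECONDITION & SPEC =====
def Spec_clean_isp (isp : Option String) (out : String) : Prop := out = clean_isp_alt isp
instance (isp : Option String) (out : String) : Decidable (Spec_clean_isp isp out) := by unfold Spec_clean_isp; infer_instance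

-- ===== CLAIM (what is proved, stated in full; the proofs are below) =====
def Claim_equal_clean_isp : Prop := ∀ (isp : Option String), Dom_clean_isp isp → Spec_clean_isp isp (clean_isp isp)

-- ===== LEMMAS AND PROOFS =====

theorem go_single (c : Char) : ∀ (l : List Char) (fuel : Nat) (acc : List Char), l.length ≤ fuel →
    PySem.Chars.replace.go [c] [' '] fuel l acc
      = acc.reverse ++ l.map (fun x => if x = c then ' ' else x)
  | [], 0, acc, _ => by simp [PySem.Chars.replace.go]
  | [], (f+1), acc, _ => by simp [PySem.Chars.replace.go]
  | (c' :: t), (f+1), acc, h => by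
    rw [PySem.Chars.replace.go]
    by_cases hc : c = c'
    · subst hc
      simp only [List.isPrefixOf, BEq.rfl, Bool.true_and, if_pos]
      rw [show List.drop [c].length (c :: t) = t from rfl,
        show [' '].reverse ++ acc = ' ' :: acc from rfl]
      rw [go_single c t f (' ' :: acc) (by simpa using h)]
      simp
    · have : List.isPrefixOf [c] (c' :: t) = false := by
        simp [List.isPrefixOf, hc]
      rw [this]
      simp only [Bool.false_eq_true, if_false]
      rw [go_single c t f (c' :: acc) (by simpa using h)]
      simp only [List.map_cons, List.reverse_cons, List.append_assoc, List.singleton_append]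
      rw [if_neg (fun he : c' = c => hc (Eq.symm he))]

theorem replace_single (c : Char) (s : List Char) :
    PySem.Chars.replace s [c] [' '] = s.map (fun x => if x = c then ' ' else x) := by
  rw [PySem.Chars.replace]
  simp only [List.isEmpty_cons, Bool.false_eq_true, if_false]
  rw [go_single c s s.length [] le_rfl]
  simp

theorem fold_replace (cs : List Char) (h : ' ' ∉ cs) : ∀ (s : String),
    (cs.foldl (fun acc c => PySem.Str.replace acc (String.ofList [c]) " ") s).toList
      = s.toList.map (fun x => if x ∈ cs then ' ' else x) := by
  induction cs with
  | nil => intro s; simp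
  | cons c cs' ih =>
    intro s
    have hsp : ' ' ∉ cs' := fun hm => h (List.mem_cons_of_mem _ hm)
    rw [List.foldl_cons, ih hsp]
    rw [PySem.Str.toList_replace]
    have h1 : (String.ofList [c]).toList = [c] := by simp
    have h2 : (" " : String).toList = [' '] := by decide
    rw [h1, h2, replace_single, List.map_map]
    apply List.map_congr_left
    intro x _
    by_cases hx : x = c
    · subst hx
      simp [hsp]
    · simp only [Function.comp_apply, if_neg hx, List.mem_cons]
      by_cases hx' : x ∈ cs' <;> simp [hx, hx']

def goodWord (w : List Char) : Prop := w ≠ [] ∧ ∀ c ∈ w, PySem.Chars.isspace c = false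

theorem split₀_go_words : ∀ (s cur : List Char) (acc : List (List Char)),
    (∀ w ∈ acc, goodWord w) → (∀ c ∈ cur, PySem.Chars.isspace c = false) →
    ∀ w ∈ PySem.Chars.split₀.go s cur acc, goodWord w
  | [], cur, acc, hacc, hcur => by
    rw [PySem.Chars.split₀.go]
    by_cases hc : cur = []
    · simp only [hc, List.isEmpty_nil, if_pos]
      intro w hw
      exact hacc w (List.mem_reverse.mp hw)
    · rw [if_neg (by simp [List.isEmpty_iff, hc])]
      intro w hw
      rcases List.mem_cons.mp (List.mem_reverse.mp hw) with h | h
      · subst h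
        exact ⟨by simpa using hc, fun x hx => hcur x (List.mem_reverse.mp hx)⟩
      · exact hacc w h
  | (c :: rest), cur, acc, hacc, hcur => by
    rw [PySem.Chars.split₀.go]
    by_cases hsp : PySem.Chars.isspace c = true
    · rw [if_pos hsp]
      by_cases hc : cur = []
      · simp only [hc, List.isEmpty_nil, if_pos]
        exact split₀_go_words rest [] acc hacc (by simp)
      · rw [if_neg (by simp [List.isEmpty_iff, hc])]
        refine split₀_go_words rest [] (cur.reverse :: acc) ?_ (by simp)
        intro w hw
        rcases List.mem_cons.mp hw with h | h
        · subst h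
          exact ⟨by simpa using hc, fun x hx => hcur x (List.mem_reverse.mp hx)⟩
        · exact hacc w h
    · rw [if_neg hsp]
      refine split₀_go_words rest (c :: cur) acc hacc ?_
      intro x hx
      rcases List.mem_cons.mp hx with h | h
      · subst h; simpa using hsp
      · exact hcur x h

theorem split₀_words (t : List Char) :
    ∀ w ∈ PySem.Chars.split₀ t, goodWord w := by
  rw [PySem.Chars.split₀]
  exact split₀_go_words t [] [] (by simp) (by simp)

theorem ic_nil : List.intercalate [' '] ([] : List (List Char)) = [] := by
  simp [List.intercalate]

theorem ic_cons_cons (a b : List Char) (l : List (List Char)) :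
    [' '].intercalate (a :: b :: l) = a ++ [' '] ++ [' '].intercalate (b :: l) := by
  simp [List.intercalate, List.intersperse]

theorem ic_singleton (w : List Char) : [' '].intercalate [w] = w := by
  simp [List.intercalate]

theorem head?_intercalate (ws : List (List Char)) (hws : ∀ w ∈ ws, goodWord w)
    (c : Char) (hc : ([' '].intercalate ws).head? = some c) :
    PySem.Chars.isspace c = false := by
  match ws with
  | [] => rw [ic_nil] at hc; simp at hc
  | w :: rest =>
    have hw := hws w (by simp)
    match w, hw with
    | (a :: w'), ⟨_, hall⟩ =>
      have hh : ([' '].intercalate ((a :: w') :: rest)).head? = some a := by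
        cases rest with
        | nil => rw [ic_singleton]; rfl
        | cons b r => rw [ic_cons_cons]; simp
      rw [hh] at hc
      exact (Option.some_inj.mp hc) ▸ hall a (by simp)

theorem intercalate_ne_nil (ws : List (List Char)) (hne : ws ≠ [])
    (hws : ∀ w ∈ ws, goodWord w) : [' '].intercalate ws ≠ [] := by
  match ws with
  | [w] =>
    have := (hws w (by simp)).1
    simpa [ic_singleton] using this
  | w :: b :: r =>
    rw [ic_cons_cons]
    simp

theorem getLast?_intercalate (ws : List (List Char)) (hws : ∀ w ∈ ws, goodWord w)
    (c : Char) (hc : ([' '].intercalate ws).getLast? = some c) :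
    PySem.Chars.isspace c = false := by
  match ws with
  | [] => rw [ic_nil] at hc; simp at hc
  | [w] =>
    have hw := hws w (by simp)
    rw [ic_singleton] at hc
    exact hw.2 c (List.mem_of_getLast? hc)
  | w :: b :: r =>
    rw [ic_cons_cons] at hc
    have hne : [' '].intercalate (b :: r) ≠ [] :=
      intercalate_ne_nil _ (by simp) (fun x hx => hws x (by simp [hx]))
    rw [List.append_assoc, List.getLast?_append, List.getLast?_append] at hc
    obtain ⟨x, hx⟩ := Option.isSome_iff_exists.mp (List.getLast?_isSome.mpr hne)
    rw [hx] at hc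
    have hxc : x = c := by simpa [Option.or] using hc
    exact hxc ▸ getLast?_intercalate (b :: r) (fun y hy => hws y (by simp [hy])) x hx

theorem dropWhile_no (l : List Char)
    (h : ∀ c, l.head? = some c → PySem.Chars.isspace c = false) :
    List.dropWhile PySem.Chars.isspace l = l := by
  cases l with
  | nil => rfl
  | cons a l' => simp [h a rfl]

theorem strip_join_split₀ (t : List Char) :
    PySem.Chars.strip (PySem.Chars.join [' '] (PySem.Chars.split₀ t))
      = PySem.Chars.join [' '] (PySem.Chars.split₀ t) := by
  rw [PySem.Chars.join, PySem.Chars.strip, PySem.Chars.lstrip, PySem.Chars.rstrip]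
  have hwords := split₀_words t
  rw [dropWhile_no _ (head?_intercalate _ hwords)]
  rw [dropWhile_no _ (fun c hc => by
    rw [List.head?_reverse] at hc
    exact getLast?_intercalate _ hwords c hc)]
  rw [List.reverse_reverse]

-- ===== VERDICT (by name: the statement is the Claim_ definition above) =====
theorem clean_isp_spec : Claim_equal_clean_isp := by
  intro isp _
  unfold Spec_clean_isp clean_isp clean_isp_alt
  match isp with
  | none => rfl
  | some s =>
    by_cases hs : s = ""
    · simp [hs]
    · simp only [hs, if_false]
      apply String.ext
      have hlist : ([",", ".", ";", ":", "!", "?", "@", "#", "$", "%", "&", "*", "(", ")"] : List String)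
          = pvPunct.map (fun c => String.ofList [c]) := by decide
      rw [PySem.Str.toList_strip, PySem.Str.toList_join, PySem.Str.split₀_map_toList, hlist,
        List.foldl_map]
      have hf := fold_replace pvPunct (by decide) s
      rw [hf]
      rw [PySem.Str.toList_join, PySem.Str.split₀_map_toList]
      have : (String.ofList (s.toList.map (fun c => if c ∈ pvPunct then ' ' else c))).toList
          = s.toList.map (fun c => if c ∈ pvPunct then ' ' else c) := by simp
      rw [this]
      exact strip_join_split₀ _
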